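-- pv_equiv track=rewrite | github.com/mkbabb/lottery-analysis | keno/scripts/bit_manipulations.py | bits_to_nums_small
-- ===== SOURCE A (Python) =====
-- from typing import Any, Callable, Dict, List, Optional, Union
--
-- def bits_to_nums_small(bits: List[int],
--                        bit_length: int,
--                        delim: str = None) -> str:
--     nums_l: List[str] = []
--     def f(num, i):
--         while (i != 0):
--             nums_l.append(str(num)) if (i & 1 != 0) else 0
--             num += 1
--             i >>= 1
--     list(map(lambda x: f(x[0] * bit_length, x[1]), enumerate(bits)))
--     return "".join(nums_l) if delim is None else f"{delim}".join(nums_l)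
-- ===== SOURCE B (Python) =====
-- def bits_to_nums_small(bits, bit_length, delim=None):
--     def bit_positions(i):
--         if i == 0:
--             return []
--         return ([0] if i & 1 else []) + [p + 1 for p in bit_positions(i >> 1)]
--     nums_l = [str(x * bit_length + p)
--               for x, i in enumerate(bits)
--               for p in bit_positions(i)]
--     return ("" if delim is None else delim).join(nums_l)
-- ===== Notes on version B (the rewrite author's own statement) =====
-- stated objective: simpler
-- what changed: The imperative while-loop that shifts each int bit by bit while mutating a shared accumulator list is replaced by a pure recursive bit_positions function plus a single list comprehension over enumerate(bits) that builds all numbered strings declaratively.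
import Mathlib
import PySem

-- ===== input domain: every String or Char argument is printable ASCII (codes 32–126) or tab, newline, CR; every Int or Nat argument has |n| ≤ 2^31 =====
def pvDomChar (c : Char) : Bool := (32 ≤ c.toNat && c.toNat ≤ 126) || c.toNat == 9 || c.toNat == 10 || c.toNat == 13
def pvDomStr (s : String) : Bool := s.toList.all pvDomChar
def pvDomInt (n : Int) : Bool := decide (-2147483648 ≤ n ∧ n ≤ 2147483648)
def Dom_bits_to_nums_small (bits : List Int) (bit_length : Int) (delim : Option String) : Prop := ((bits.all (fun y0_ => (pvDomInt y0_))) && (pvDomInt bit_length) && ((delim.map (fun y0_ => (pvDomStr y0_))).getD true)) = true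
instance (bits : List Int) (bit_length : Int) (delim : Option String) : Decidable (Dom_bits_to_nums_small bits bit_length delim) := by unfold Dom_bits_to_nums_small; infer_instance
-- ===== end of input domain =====

-- B replaces A's imperative bit-shift while-loop with accumulator mutation by a pure
-- recursive bit-position function plus a flat comprehension; return value proved equal.


-- ===== PORT A =====
-- inner 'while i != 0' of A's f; Python diverges for i < 0 (excluded by Pre_),
-- so the 'i ≤ 0 → stop' branch is only a totality guard (faithful at i = 0).
def pvLoopA (num : Int) (i : Int) (acc : List String) : Nat → List String
  | 0 => acc
  | fuel+1 =>
    if i ≤ 0 then acc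
    else pvLoopA (num + 1) (i >>> (1 : Nat))
          (if PySem.Int.band i 1 ≠ 0 then acc ++ [PySem.Int.toStr num] else acc) fuel

def bits_to_nums_small (bits : List Int) (bit_length : Int) (delim : Option String) : String :=
  let nums_l := (PySem.List.enumerate bits).foldl
    (fun acc x => pvLoopA (x.1 * bit_length) x.2 acc (x.2.toNat + 1)) []
  match delim with
  | none => PySem.Str.join "" nums_l
  | some d => PySem.Str.join d nums_l

-- ===== PORT B =====
-- Source B's recursive bit_positions; for i < 0 Python's recursion never reaches 0
-- (RecursionError, excluded by Pre_), so 'i ≤ 0 → []' is only a totality guard.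
def pvBitPositions (i : Int) : List Nat :=
  if h : i ≤ 0 then []
  else (if PySem.Int.band i 1 ≠ 0 then [0] else [])
        ++ (pvBitPositions (i >>> (1 : Nat))).map (· + 1)
termination_by i.toNat
decreasing_by
  rw [Int.shiftRight_eq_div_pow]
  omega

def bits_to_nums_small_alt (bits : List Int) (bit_length : Int) (delim : Option String) : String :=
  PySem.Str.join (match delim with | none => "" | some d => d)
    ((PySem.List.enumerate bits).flatMap
      (fun x => (pvBitPositions x.2).map (fun p => PySem.Int.toStr (x.1 * bit_length + ↑p))))

-- ===== PRECONDITION & SPEC =====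
-- Pre_ excludes lists containing a negative entry: on those A's inner
-- 'while i != 0' with 'i >>= 1' never terminates (Python diverges, no value is returned).
def Pre_bits_to_nums_small (bits : List Int) (bit_length : Int) (delim : Option String) : Prop :=
  ∀ i ∈ bits, 0 ≤ i
instance (bits : List Int) (bit_length : Int) (delim : Option String) : Decidable (Pre_bits_to_nums_small bits bit_length delim) := by unfold Pre_bits_to_nums_small; infer_instance

def pvWitness_bits_to_nums_small : List Int × Int × Option String := ([5, 3], 6, some ",")

def Spec_bits_to_nums_small (bits : List Int) (bit_length : Int) (delim : Option String) (out : String) : Prop := out = bits_to_nums_small_alt bits bit_length delim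
instance (bits : List Int) (bit_length : Int) (delim : Option String) (out : String) : Decidable (Spec_bits_to_nums_small bits bit_length delim out) := by unfold Spec_bits_to_nums_small; infer_instance

-- ===== CLAIM (what is proved, stated in full; the proofs are below) =====
def Claim_equal_bits_to_nums_small : Prop := ∀ (bits : List Int) (bit_length : Int) (delim : Option String), Dom_bits_to_nums_small bits bit_length delim → Pre_bits_to_nums_small bits bit_length delim → Spec_bits_to_nums_small bits bit_length delim (bits_to_nums_small bits bit_length delim)

-- ===== LEMMAS AND PROOFS =====

-- proof-side Nat mirror of pvBitPositions: the set-bit positions of n, lowest first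
def pvBitIndices : Nat → List Nat
  | 0 => []
  | (n+1) => (if (n+1) % 2 = 1 then [0] else []) ++ (pvBitIndices ((n+1)/2)).map (·+1)
decreasing_by omega

theorem pvBitIndices_pos (n : Nat) (h : 0 < n) :
    pvBitIndices n = (if n % 2 = 1 then [0] else []) ++ (pvBitIndices (n/2)).map (·+1) := by
  cases n with
  | zero => omega
  | succ m => rw [pvBitIndices]

theorem pvBitPositions_natCast (n : Nat) : pvBitPositions ↑n = pvBitIndices n := by
  induction n using Nat.strong_induction_on with
  | _ n ih =>
    cases Nat.eq_zero_or_pos n with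
    | inl h0 => subst h0; rw [pvBitPositions]; simp [pvBitIndices]
    | inr hn =>
      rw [pvBitPositions, dif_neg (by exact_mod_cast by omega)]
      have hshift : (↑n : Int) >>> (1:Nat) = ↑(n/2) := by
        rw [Int.shiftRight_eq_div_pow]; omega
      have hband : PySem.Int.band ↑n 1 = ↑(n % 2) := by
        have h1 : PySem.Int.band (↑n) (↑(1:Nat)) = ↑(n &&& 1) := PySem.Int.band_natCast n 1
        simpa [Nat.and_one_is_mod] using h1
      rw [hshift, hband, ih (n/2) (by omega), pvBitIndices_pos n hn]
      rcases Nat.mod_two_eq_zero_or_one n with ho | ho <;> simp [ho]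

theorem pvLoopA_spec (num : Int) (n : Nat) (acc : List String) (fuel : Nat) (hf : n < fuel) :
    pvLoopA num ↑n acc fuel = acc ++ (pvBitIndices n).map (fun p => PySem.Int.toStr (num + ↑p)) := by
  induction n using Nat.strong_induction_on generalizing num acc fuel with
  | _ n ih =>
    cases fuel with
    | zero => omega
    | succ f =>
    cases Nat.eq_zero_or_pos n with
    | inl h0 =>
      subst h0
      rw [pvLoopA]
      simp [pvBitIndices]
    | inr hn =>
      rw [pvLoopA, if_neg (by exact_mod_cast by omega)]
      have hshift : (↑n : Int) >>> (1:Nat) = ↑(n/2) := by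
        rw [Int.shiftRight_eq_div_pow]
        omega
      have hband : PySem.Int.band ↑n 1 = ↑(n % 2) := by
        have h1 : PySem.Int.band (↑n) (↑(1:Nat)) = ↑(n &&& 1) := PySem.Int.band_natCast n 1
        simpa [Nat.and_one_is_mod] using h1
      rw [hshift, hband, pvBitIndices_pos n hn]
      rcases Nat.mod_two_eq_zero_or_one n with ho | ho
      · rw [ho, if_neg (by simp), ih (n/2) (by omega) _ _ _ (by omega)]
        simp [List.map_map]
        intro a _
        congr 1
        ring
      · rw [ho, if_pos (by simp), ih (n/2) (by omega) _ _ _ (by omega)]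
        simp [List.map_map]
        intro a _
        congr 1
        ring

-- ===== VERDICT (by name: the statement is the Claim_ definition above) =====
theorem bits_to_nums_small_spec : Claim_equal_bits_to_nums_small := by
  intro bits bit_length delim _hdom hpre
  unfold Spec_bits_to_nums_small bits_to_nums_small bits_to_nums_small_alt
  have hfold : ∀ (l : List (Int × Int)), (∀ p ∈ l, 0 ≤ p.2) → ∀ acc : List String,
      l.foldl (fun acc x => pvLoopA (x.1 * bit_length) x.2 acc (x.2.toNat + 1)) acc
        = acc ++ l.flatMap
            (fun x => (pvBitPositions x.2).map (fun p => PySem.Int.toStr (x.1 * bit_length + ↑p))) := by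
    intro l
    induction l with
    | nil => intro _ acc; simp
    | cons p t ih =>
      intro hl acc
      obtain ⟨n, hn⟩ := Int.eq_ofNat_of_zero_le (hl p (by simp))
      simp only [List.foldl_cons, List.flatMap_cons]
      rw [hn, pvLoopA_spec _ _ _ _ (by simp), pvBitPositions_natCast,
          ih (fun q hq => hl q (by simp [hq]))]
      simp
  have hmem : ∀ p ∈ PySem.List.enumerate bits, 0 ≤ p.2 := by
    intro p hp
    rw [PySem.List.mem_enumerate_iff] at hp
    obtain ⟨k, hk, rfl⟩ := hp
    exact hpre _ (List.getElem_mem hk)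
  rw [hfold _ hmem]
  cases delim <;> rfl
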